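-- pv_equiv track=rewrite | github.com/buzusima/XAU_AI | smc_signal_engine.py | find_best_mt5_symbol
-- ===== SOURCE A (Python) =====
-- from typing import Dict, List, Tuple, Optional, Any
--
-- def find_best_mt5_symbol(model_symbol: str, mt5_symbols: List[str]) -> Optional[str]:
--     """Find best matching MT5 symbol for model symbol"""
--
--     model_upper = model_symbol.upper()
--
--     # Direct exact match
--     for mt5_sym in mt5_symbols:
--         if mt5_sym.upper() == model_upper:
--             return mt5_sym
--
--     # Check for common suffixes (.c, .v, .m, etc.)
--     for mt5_sym in mt5_symbols:
--         base_mt5 = mt5_sym.split('.')[0].upper()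
--         base_model = model_symbol.split('.')[0].split('_')[0].upper()
--
--         if base_mt5 == base_model:
--             return mt5_sym
--
--     # Special case mappings
--     if "EURUSD" in model_upper:
--         for mt5_sym in mt5_symbols:
--             if "EUR" in mt5_sym.upper() and "USD" in mt5_sym.upper():
--                 return mt5_sym
--
--     if any(term in model_upper for term in ["XAU", "GOLD"]):
--         for mt5_sym in mt5_symbols:
--             if any(term in mt5_sym.upper() for term in ["XAU", "GOLD"]):
--                 return mt5_sym
--
--     return None
-- ===== SOURCE B (Python) =====
-- def find_best_mt5_symbol(model_symbol, mt5_symbols):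
--     """Find best matching MT5 symbol for model symbol (single priority-tracking pass)."""
--     model_upper = model_symbol.upper()
--     base_model = model_symbol.split('.')[0].split('_')[0].upper()
--     wants_eurusd = "EURUSD" in model_upper
--     wants_xau = "XAU" in model_upper or "GOLD" in model_upper
--
--     best_tier = 4
--     best_sym = None
--     for sym in mt5_symbols:
--         u = sym.upper()
--         if u == model_upper:
--             tier = 0
--         elif sym.split('.')[0].upper() == base_model:
--             tier = 1
--         elif wants_eurusd and "EUR" in u and "USD" in u:
--             tier = 2
--         elif wants_xau and ("XAU" in u or "GOLD" in u):
--             tier = 3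
--         else:
--             continue
--         if tier < best_tier:
--             best_tier = tier
--             best_sym = sym
--             if tier == 0:
--                 break
--     return best_sym
-- ===== Notes on version B (the rewrite author's own statement) =====
-- stated objective: faster
-- what changed: A's four sequential priority scans over mt5_symbols are replaced by a single priority-tracking pass that assigns each symbol a tier (0 exact, 1 base match, 2 gated EUR&USD, 3 gated XAU/GOLD) and keeps the earliest symbol of the lowest tier, breaking early on an exact match; model_upper, base_model and the two gates are computed once instead of per element.
import Mathlib
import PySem

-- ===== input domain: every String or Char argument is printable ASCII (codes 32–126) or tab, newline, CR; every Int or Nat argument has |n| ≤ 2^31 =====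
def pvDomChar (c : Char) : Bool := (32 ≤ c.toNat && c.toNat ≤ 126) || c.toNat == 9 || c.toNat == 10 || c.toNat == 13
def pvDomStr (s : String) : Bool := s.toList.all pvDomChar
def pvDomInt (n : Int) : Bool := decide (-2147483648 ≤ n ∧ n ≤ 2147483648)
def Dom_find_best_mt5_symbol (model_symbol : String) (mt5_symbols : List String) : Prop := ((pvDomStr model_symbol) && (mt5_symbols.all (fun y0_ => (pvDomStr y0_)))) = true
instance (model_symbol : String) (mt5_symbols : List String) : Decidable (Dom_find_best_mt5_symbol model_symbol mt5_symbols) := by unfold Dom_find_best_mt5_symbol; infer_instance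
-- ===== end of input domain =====

-- B replaces A's four sequential priority scans by one priority-tracking pass with hoisted gates (objective: faster, constant-factor; measured).

-- ===== PORT A =====
-- s.split(sep)[0] for a nonempty sep; split on a nonempty separator always yields a
-- nonempty list, so the two defaults are never used.
def pvSplitHead (s sep : String) : String :=
  (((PySem.Str.split? s sep).getD [s]).headD s)

def find_best_mt5_symbol (model_symbol : String) (mt5_symbols : List String) : Option String :=
  let model_upper := PySem.Str.upper model_symbol
  -- Direct exact match
  match mt5_symbols.find? (fun mt5_sym => PySem.Str.upper mt5_sym == model_upper) with
  | some s => some s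
  | none =>
    -- Check for common suffixes (.c, .v, .m, etc.)
    match mt5_symbols.find? (fun mt5_sym =>
        PySem.Str.upper (pvSplitHead mt5_sym ".") ==
        PySem.Str.upper (pvSplitHead (pvSplitHead model_symbol ".") "_")) with
    | some s => some s
    | none =>
      -- Special case mappings
      match (if PySem.Str.isIn "EURUSD" model_upper then
               mt5_symbols.find? (fun mt5_sym =>
                 PySem.Str.isIn "EUR" (PySem.Str.upper mt5_sym) &&
                 PySem.Str.isIn "USD" (PySem.Str.upper mt5_sym))
             else none) with
      | some s => some s
      | none =>
        if PySem.Str.isIn "XAU" model_upper || PySem.Str.isIn "GOLD" model_upper then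
          mt5_symbols.find? (fun mt5_sym =>
            PySem.Str.isIn "XAU" (PySem.Str.upper mt5_sym) ||
            PySem.Str.isIn "GOLD" (PySem.Str.upper mt5_sym))
        else none

-- ===== PORT B =====
def pvTierOf (model_upper base_model : String) (wants_eurusd wants_xau : Bool)
    (sym : String) : Nat :=
  let u := PySem.Str.upper sym
  if u == model_upper then 0
  else if PySem.Str.upper (pvSplitHead sym ".") == base_model then 1
  else if wants_eurusd && (PySem.Str.isIn "EUR" u && PySem.Str.isIn "USD" u) then 2
  else if wants_xau && (PySem.Str.isIn "XAU" u || PySem.Str.isIn "GOLD" u) then 3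
  else 4

def pvBestLoop (model_upper base_model : String) (wants_eurusd wants_xau : Bool) :
    List String → Nat → Option String → Option String
  | [], _, best_sym => best_sym
  | sym :: rest, best_tier, best_sym =>
    let tier := pvTierOf model_upper base_model wants_eurusd wants_xau sym
    if tier < best_tier then
      if tier = 0 then some sym
      else pvBestLoop model_upper base_model wants_eurusd wants_xau rest tier (some sym)
    else pvBestLoop model_upper base_model wants_eurusd wants_xau rest best_tier best_sym

def find_best_mt5_symbol_alt (model_symbol : String) (mt5_symbols : List String) : Option String :=
  let model_upper := PySem.Str.upper model_symbol
  let base_model := PySem.Str.upper (pvSplitHead (pvSplitHead model_symbol ".") "_")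
  let wants_eurusd := PySem.Str.isIn "EURUSD" model_upper
  let wants_xau := PySem.Str.isIn "XAU" model_upper || PySem.Str.isIn "GOLD" model_upper
  pvBestLoop model_upper base_model wants_eurusd wants_xau mt5_symbols 4 none

-- ===== PRECONDITION & SPEC =====
def Spec_find_best_mt5_symbol (model_symbol : String) (mt5_symbols : List String) (out : Option String) : Prop := out = find_best_mt5_symbol_alt model_symbol mt5_symbols
instance (model_symbol : String) (mt5_symbols : List String) (out : Option String) : Decidable (Spec_find_best_mt5_symbol model_symbol mt5_symbols out) := by unfold Spec_find_best_mt5_symbol; infer_instance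

-- ===== CLAIM (what is proved, stated in full; the proofs are below) =====
def Claim_equal_find_best_mt5_symbol : Prop := ∀ (model_symbol : String) (mt5_symbols : List String), Dom_find_best_mt5_symbol model_symbol mt5_symbols → Spec_find_best_mt5_symbol model_symbol mt5_symbols (find_best_mt5_symbol model_symbol mt5_symbols)

-- ===== LEMMAS AND PROOFS =====

-- spec of pvBestLoop: first element of the lowest tier strictly below the running bound
def pvPick (mu bm : String) (gE gX : Bool) (xs : List String) (bt : Nat) : Option String :=
  ((if 0 < bt then xs.find? (fun s => pvTierOf mu bm gE gX s == 0) else none).or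
   (((if 1 < bt then xs.find? (fun s => pvTierOf mu bm gE gX s == 1) else none).or
     (((if 2 < bt then xs.find? (fun s => pvTierOf mu bm gE gX s == 2) else none).or
       (if 3 < bt then xs.find? (fun s => pvTierOf mu bm gE gX s == 3) else none))))))

theorem pvTierOf_le_four (mu bm : String) (gE gX : Bool) (s : String) :
    pvTierOf mu bm gE gX s ≤ 4 := by
  unfold pvTierOf; dsimp only; split_ifs <;> omega

theorem pvBestLoop_eq_pick (mu bm : String) (gE gX : Bool) :
    ∀ (xs : List String) (bt : Nat), bt ≤ 4 → ∀ (b : Option String),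
      pvBestLoop mu bm gE gX xs bt b = (pvPick mu bm gE gX xs bt).or b := by
  intro xs
  induction xs with
  | nil => intro bt hbt b; simp [pvBestLoop, pvPick]
  | cons s rest ih =>
    intro bt hbt b
    have hle := pvTierOf_le_four mu bm gE gX s
    obtain ⟨k, hk⟩ : ∃ k, pvTierOf mu bm gE gX s = k := ⟨_, rfl⟩
    rw [pvBestLoop]
    rw [hk] at hle ⊢
    interval_cases k
    · -- tier 0
      by_cases h : 0 < bt
      · simp [h, pvPick, hk]
      · have hbt0 : bt = 0 := by omega
        subst hbt0
        simp only [if_neg h, ih 0 (by omega) b]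
        simp [pvPick]
    · -- tier 1
      by_cases h : 1 < bt
      · have h0 : 0 < bt := by omega
        rw [if_pos h, if_neg (by omega), ih 1 (by omega) (some s)]
        simp [pvPick, hk, h, h0]
      · rw [if_neg h, ih bt hbt b]
        have h2 : ¬ 2 < bt := by omega
        have h3 : ¬ 3 < bt := by omega
        simp [pvPick, hk, h, h2, h3]
    · -- tier 2
      by_cases h : 2 < bt
      · have h0 : 0 < bt := by omega
        have h1 : 1 < bt := by omega
        rw [if_pos h, if_neg (by omega), ih 2 (by omega) (some s)]
        simp [pvPick, hk, h, h0, h1]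
      · rw [if_neg h, ih bt hbt b]
        have h3 : ¬ 3 < bt := by omega
        simp [pvPick, hk, h, h3]
    · -- tier 3
      by_cases h : 3 < bt
      · have h0 : 0 < bt := by omega
        have h1 : 1 < bt := by omega
        have h2 : 2 < bt := by omega
        rw [if_pos h, if_neg (by omega), ih 3 (by omega) (some s)]
        simp [pvPick, hk, h, h0, h1, h2]
      · rw [if_neg h, ih bt hbt b]
        simp [pvPick, hk, h]
    · -- tier 4: never taken
      rw [if_neg (by omega), ih bt hbt b]
      simp [pvPick, hk]

theorem pvFind?_congr {α : Type} (p q : α → Bool) :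
    ∀ (xs : List α), (∀ x ∈ xs, p x = q x) → xs.find? p = xs.find? q := by
  intro xs
  induction xs with
  | nil => intro _; rfl
  | cons a l ih =>
    intro h
    simp only [List.find?_cons]
    rw [h a (by simp)]
    split
    · rfl
    · exact ih (fun x hx => h x (by simp [hx]))

-- tier characterisations used to align pvPick's four scans with A's four scans
theorem pvTier0_char (mu bm : String) (gE gX : Bool) (x : String) :
    (pvTierOf mu bm gE gX x == 0) = (PySem.Str.upper x == mu) := by
  unfold pvTierOf; dsimp only; split_ifs <;> simp_all

theorem pvTier1_char (mu bm : String) (gE gX : Bool) (x : String)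
    (h0 : (PySem.Str.upper x == mu) = false) :
    (pvTierOf mu bm gE gX x == 1) = (PySem.Str.upper (pvSplitHead x ".") == bm) := by
  unfold pvTierOf; dsimp only; rw [h0]; split_ifs <;> simp_all

theorem pvTier2_char (mu bm : String) (gE gX : Bool) (x : String)
    (h0 : (PySem.Str.upper x == mu) = false)
    (h1 : (PySem.Str.upper (pvSplitHead x ".") == bm) = false) :
    (pvTierOf mu bm gE gX x == 2) =
      (gE && (PySem.Str.isIn "EUR" (PySem.Str.upper x) && PySem.Str.isIn "USD" (PySem.Str.upper x))) := by
  unfold pvTierOf; dsimp only; rw [h0, h1]; split_ifs <;> simp_all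

theorem pvTier3_char (mu bm : String) (gE gX : Bool) (x : String)
    (h0 : (PySem.Str.upper x == mu) = false)
    (h1 : (PySem.Str.upper (pvSplitHead x ".") == bm) = false)
    (h2 : (gE && (PySem.Str.isIn "EUR" (PySem.Str.upper x) && PySem.Str.isIn "USD" (PySem.Str.upper x))) = false) :
    (pvTierOf mu bm gE gX x == 3) =
      (gX && (PySem.Str.isIn "XAU" (PySem.Str.upper x) || PySem.Str.isIn "GOLD" (PySem.Str.upper x))) := by
  unfold pvTierOf; dsimp only; rw [h0, h1, h2]; split_ifs <;> simp_all

-- ===== VERDICT (by name: the statement is the Claim_ definition above) =====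
theorem find_best_mt5_symbol_spec : Claim_equal_find_best_mt5_symbol := by
  intro m xs _
  unfold Spec_find_best_mt5_symbol find_best_mt5_symbol find_best_mt5_symbol_alt
  rw [pvBestLoop_eq_pick _ _ _ _ _ _ (by omega)]
  set mu := PySem.Str.upper m with hmu
  set bm := PySem.Str.upper (pvSplitHead (pvSplitHead m ".") "_") with hbm
  set gE := PySem.Str.isIn "EURUSD" mu with hgE
  set gX := (PySem.Str.isIn "XAU" mu || PySem.Str.isIn "GOLD" mu) with hgX
  unfold pvPick
  simp only [show ((0:Nat) < 4) = True from by simp, show ((1:Nat) < 4) = True from by simp,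
    show ((2:Nat) < 4) = True from by simp, show ((3:Nat) < 4) = True from by simp,
    if_true, Option.or_none]
  rw [pvFind?_congr _ _ xs (fun x _ => pvTier0_char mu bm gE gX x)]
  cases hf0 : xs.find? (fun x => PySem.Str.upper x == mu) with
  | some s => simp
  | none =>
    have H0 : ∀ x ∈ xs, (PySem.Str.upper x == mu) = false := by
      intro x hx
      simpa using List.find?_eq_none.mp hf0 x hx
    simp only [Option.none_or]
    rw [pvFind?_congr _ _ xs (fun x hx => pvTier1_char mu bm gE gX x (H0 x hx))]
    cases hf1 : xs.find? (fun x => PySem.Str.upper (pvSplitHead x ".") == bm) with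
    | some s => simp
    | none =>
      have H1 : ∀ x ∈ xs, (PySem.Str.upper (pvSplitHead x ".") == bm) = false := by
        intro x hx
        simpa using List.find?_eq_none.mp hf1 x hx
      simp only [Option.none_or]
      rw [pvFind?_congr _ _ xs (fun x hx => pvTier2_char mu bm gE gX x (H0 x hx) (H1 x hx))]
      have e2 : xs.find? (fun x => gE && (PySem.Str.isIn "EUR" (PySem.Str.upper x) &&
            PySem.Str.isIn "USD" (PySem.Str.upper x))) =
          (if gE then xs.find? (fun x => PySem.Str.isIn "EUR" (PySem.Str.upper x) &&
            PySem.Str.isIn "USD" (PySem.Str.upper x)) else none) := by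
        cases hE : gE with
        | true => simp
        | false => simp
      rw [e2]
      cases hf2 : (if gE then xs.find? (fun x => PySem.Str.isIn "EUR" (PySem.Str.upper x) &&
          PySem.Str.isIn "USD" (PySem.Str.upper x)) else none) with
      | some s => simp
      | none =>
        have H2 : ∀ x ∈ xs, (gE && (PySem.Str.isIn "EUR" (PySem.Str.upper x) &&
            PySem.Str.isIn "USD" (PySem.Str.upper x))) = false := by
          intro x hx
          cases hE : gE with
          | false => simp
          | true =>
            rw [hE] at hf2
            simp only [if_true] at hf2
            simpa using List.find?_eq_none.mp hf2 x hx
        simp only [Option.none_or]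
        rw [pvFind?_congr _ _ xs
          (fun x hx => pvTier3_char mu bm gE gX x (H0 x hx) (H1 x hx) (H2 x hx))]
        cases hX : gX with
        | true =>
          have hX' : (PySem.Str.isIn "XAU" mu || PySem.Str.isIn "GOLD" mu) = true := hgX ▸ hX
          rw [if_pos hX']
          simp only [Bool.true_and]
        | false =>
          have hX' : (PySem.Str.isIn "XAU" mu || PySem.Str.isIn "GOLD" mu) = false := hgX ▸ hX
          simp at hX'
          rw [if_neg (by simp; exact hX')]
          simp only [Bool.false_and]
          rw [List.find?_eq_none.mpr (fun x _ => by simp)]
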